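-- pv_equiv track=rewrite | github.com/oceane-sailorin/python-exercises | lessons/ladder.py | solution
-- ===== SOURCE A (Python) =====
-- def solution(A, B):
--     N = len(A)
--     maxa = max(A)
--     maxb = max(B)
--     res = [0] * N
--     fibo = [0] * (maxa+2)
--     fibo[1] = 1
--     for i in range(2, maxa + 2):
--         # x << y = Returns x with the bits shifted to the left by y places (and new bits on the right-hand-side are zeros). This is the same as multiplying x by 2**y.
--         fibo[i] = (fibo[i - 1] + fibo[i - 2]) & ((1 << maxb) - 1)
--         # To climb to A[i] rungs, come from A[i]-1 for 1 step or A[i]-2 for 2 steps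
--         #  number of different ways of climbing to the top of the ladder is the Fibonacci number at position A[i] + 1
--     for i in range(N):
--         res[i] = fibo[A[i]+1] & ((1<<B[i])-1)
--     return res
-- ===== SOURCE B (Python) =====
-- def _fd(k, m):
--     # fast doubling: returns (fib(k) % m, fib(k+1) % m) for m >= 1
--     if k == 0:
--         return (0, 1 % m)
--     f, g = _fd(k >> 1, m)
--     c = f * (2 * g - f) % m
--     d = (f * f + g * g) % m
--     if k & 1:
--         return (d, (c + d) % m)
--     return (c, d)
--
--
-- def solution(A, B):
--     return [_fd(a + 1, 1 << b)[0] for a, b in zip(A, B)]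
-- ===== Notes on version B (the rewrite author's own statement) =====
-- stated objective: alternative
-- what changed: Replaces the shared linear Fibonacci DP table (built mod 2^max(B) up to max(A)) and the second indexing pass by a per-query fast-doubling recursion that computes Fib(A[i]+1) mod 2^B[i] directly from the binary digits of the index.
-- outside the precondition, e.g. on solution([-2, 3], [4, 4]): A returns [3, 3], B raises RecursionError
import Mathlib
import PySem

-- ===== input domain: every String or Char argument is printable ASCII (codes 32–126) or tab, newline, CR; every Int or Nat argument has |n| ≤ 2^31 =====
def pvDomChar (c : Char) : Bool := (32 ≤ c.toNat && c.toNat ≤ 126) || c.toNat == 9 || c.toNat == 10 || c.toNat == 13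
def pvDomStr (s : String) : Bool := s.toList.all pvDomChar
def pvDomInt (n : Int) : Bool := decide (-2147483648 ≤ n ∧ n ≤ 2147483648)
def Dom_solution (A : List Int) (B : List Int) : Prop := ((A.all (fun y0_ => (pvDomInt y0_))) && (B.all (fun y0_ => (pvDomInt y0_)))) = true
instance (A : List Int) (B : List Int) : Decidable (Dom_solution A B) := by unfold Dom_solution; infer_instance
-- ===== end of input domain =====

-- B replaces A's linear Fibonacci DP table (mod 2^max(B)) by per-query fast-doubling
-- computation of Fib(A[i]+1) mod 2^B[i]; return values agree on Pre_ (objective: alternative).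

-- ===== PORT A =====
-- literal port of Source A: 'max(..)' (raising on []) is max?/.getD 0 under Pre_ (nonempty),
-- '1 << maxb' is Nat shiftLeft cast to Int (exact for maxb ≥ 0, Pre_; Python raises
-- ValueError on a negative shift), '&' is PySem.Int.band, element read/write are
-- PySem.List.pyGetD/pySetD (indices are in range under Pre_).
def solution (A : List Int) (B : List Int) : List Int :=
  let N : Int := (A.length : Int)
  let maxa : Int := (PySem.List.max? A (fun x => x)).getD 0
  let maxb : Int := (PySem.List.max? B (fun x => x)).getD 0
  let res0 : List Int := List.replicate N.toNat 0
  let fibo0 : List Int := List.replicate (maxa + 2).toNat 0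
  let fibo1 : List Int := PySem.List.pySetD fibo0 1 1
  let fibo : List Int :=
    (PySem.List.pyRange 2 (maxa + 2) 1).foldl
      (fun fb i =>
        PySem.List.pySetD fb i
          (PySem.Int.band (PySem.List.pyGetD fb (i - 1) 0 + PySem.List.pyGetD fb (i - 2) 0)
            (((1 <<< maxb.toNat : Nat) : Int) - 1)))
      fibo1
  (PySem.List.pyRange 0 N 1).foldl
    (fun r i =>
      PySem.List.pySetD r i
        (PySem.Int.band (PySem.List.pyGetD fibo (PySem.List.pyGetD A i 0 + 1) 0)
          (((1 <<< (PySem.List.pyGetD B i 0).toNat : Nat) : Int) - 1)))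
    res0


-- ===== PORT B =====
-- literal port of Source B: _fd's recursion runs on (a+1).toNat — exact for a ≥ -1 (Pre_;
-- for a + 1 < 0 the Python recursion does not return, RecursionError); '%' is
-- PySem.Int.mod, '1 << b' is Nat shiftLeft cast to Int (exact for b ≥ 0, Pre_).
def fdPair (m : Int) (k : Nat) : Int × Int :=
  if k = 0 then (0, PySem.Int.mod 1 m)
  else
    let p := fdPair m (k / 2)
    let f := p.1
    let g := p.2
    let c := PySem.Int.mod (f * (2 * g - f)) m
    let d := PySem.Int.mod (f * f + g * g) m
    if k % 2 = 1 then (d, PySem.Int.mod (c + d) m) else (c, d)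
  termination_by k
  decreasing_by exact Nat.div_lt_self (Nat.pos_of_ne_zero (by assumption)) (by omega)

def solution_alt (A : List Int) (B : List Int) : List Int :=
  (A.zip B).map (fun ab => (fdPair ((1 <<< ab.2.toNat : Nat) : Int) (ab.1 + 1).toNat).1)


-- ===== PRECONDITION & SPEC =====
-- Pre_ is exactly where the Python A returns a value that is not an accident of negative
-- list indexing: A nonempty with every rung count ≥ -1 and some ≥ 0 (max(A) on [] and
-- fibo[1] on a too-short table raise IndexError/ValueError; for an element ≤ -2 A reads
-- the table through a wrapped-around negative index while B's recursion raises
-- RecursionError), enough B entries (else IndexError), and the used B entries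
-- nonnegative (else ValueError on a negative shift).
def Pre_solution (A : List Int) (B : List Int) : Prop :=
  A ≠ [] ∧ A.length ≤ B.length ∧ (∀ a ∈ A, -1 ≤ a) ∧ (∃ a ∈ A, 0 ≤ a) ∧
    (∀ b ∈ B.take A.length, 0 ≤ b)
instance (A : List Int) (B : List Int) : Decidable (Pre_solution A B) := by
  unfold Pre_solution; infer_instance

def pvWitness_solution : List Int × List Int := ([3, 0, 5], [4, 0, 2])

def Spec_solution (A : List Int) (B : List Int) (out : List Int) : Prop := out = solution_alt A B
instance (A : List Int) (B : List Int) (out : List Int) : Decidable (Spec_solution A B out) := by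
  unfold Spec_solution; infer_instance

-- ===== CLAIM (what is proved, stated in full; the proofs are below) =====
def Claim_equal_solution : Prop := ∀ (A : List Int) (B : List Int), Dom_solution A B → Pre_solution A B → Spec_solution A B (solution A B)

-- ===== LEMMAS AND PROOFS =====

-- the Fibonacci value entry j of A's table carries (mod m = 2^max(B) for j ≥ 2)
def tblF (m : Int) (j : Nat) : Int :=
  if j = 0 then 0 else if j = 1 then 1 else (Nat.fib j : Int) % m

theorem shiftl_one_int (b : Nat) : ((1 <<< b : Nat) : Int) = 2 ^ b := by
  simp [Nat.shiftLeft_eq]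

theorem band_mask (x : Int) (b : Nat) (hx : 0 ≤ x) :
    PySem.Int.band x (2 ^ b - 1) = x % 2 ^ b := by
  have h1 : (1:Int) ≤ 2 ^ b := one_le_pow₀ (by norm_num)
  rw [PySem.Int.band_of_nonneg hx (by omega)]
  have ht : (2 ^ b - 1 : Int).toNat = 2 ^ b - 1 := by
    have : ((2:Int) ^ b) = ((2 ^ b : Nat) : Int) := by push_cast; ring
    omega
  rw [ht, Nat.and_two_pow_sub_one_eq_mod]
  push_cast
  rw [Int.toNat_of_nonneg hx]

theorem fib_double_int (n : Nat) :
    ((Nat.fib (2*n) : Int)) = (Nat.fib n : Int) * (2 * Nat.fib (n+1) - Nat.fib n) := by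
  have hle : Nat.fib n ≤ 2 * Nat.fib (n+1) := by
    have := Nat.fib_le_fib_succ (n := n); omega
  rw [Nat.fib_two_mul]; push_cast [hle]; ring

theorem fdPair_eq (mb : Nat) (k : Nat) :
    fdPair (2 ^ mb) k = ((Nat.fib k : Int) % 2 ^ mb, (Nat.fib (k + 1) : Int) % 2 ^ mb) := by
  induction k using Nat.strong_induction_on with
  | _ k ih =>
    have hm : (0:Int) < 2 ^ mb := by positivity
    rw [fdPair]
    by_cases h0 : k = 0
    · subst h0
      simp
    · simp only [h0, if_false]
      rw [ih (k / 2) (Nat.div_lt_self (Nat.pos_of_ne_zero h0) (by omega))]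
      set m : Int := 2 ^ mb with hmdef
      set j := k / 2 with hj
      set F : Int := (Nat.fib j : Int) with hF
      set G : Int := (Nat.fib (j+1) : Int) with hG
      have e1 : ∀ X Y : Int, ((X % m) * (2*(Y % m) - X % m)) % m = (X*(2*Y - X)) % m := by
        intro X Y
        have h1 : X % m ≡ X [ZMOD m] := Int.emod_emod_of_dvd _ dvd_rfl
        have h2 : Y % m ≡ Y [ZMOD m] := Int.emod_emod_of_dvd _ dvd_rfl
        exact h1.mul ((Int.ModEq.mul_left 2 h2).sub h1)
      have e2 : ∀ X Y : Int, ((X % m) * (X % m) + (Y % m) * (Y % m)) % m = (X*X + Y*Y) % m := by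
        intro X Y
        have h1 : X % m ≡ X [ZMOD m] := Int.emod_emod_of_dvd _ dvd_rfl
        have h2 : Y % m ≡ Y [ZMOD m] := Int.emod_emod_of_dvd _ dvd_rfl
        exact (h1.mul h1).add (h2.mul h2)
      have hceq : PySem.Int.mod ((F % m) * (2 * (G % m) - F % m)) m = (Nat.fib (2*j) : Int) % m := by
        rw [PySem.Int.mod_eq_emod_of_pos hm, e1, fib_double_int]
      have hdeq : PySem.Int.mod ((F % m) * (F % m) + (G % m) * (G % m)) m
          = (Nat.fib (2*j+1) : Int) % m := by
        rw [PySem.Int.mod_eq_emod_of_pos hm, e2]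
        congr 1
        rw [Nat.fib_two_mul_add_one]; push_cast; ring
      by_cases hpar : k % 2 = 1
      · have hk : k = 2*j + 1 := by omega
        simp only [hpar, if_true]
        rw [hceq, hdeq, hk]
        have : Nat.fib (2*j+1+1) = Nat.fib (2*j) + Nat.fib (2*j+1) := Nat.fib_add_two
        rw [this, PySem.Int.mod_eq_emod_of_pos hm, ← Int.add_emod]
        push_cast; constructor
      · have hk : k = 2*j := by omega
        simp only [hpar, if_false]
        rw [hceq, hdeq, hk]

theorem tblF_nonneg (m : Int) (hm : 0 < m) (j : Nat) : 0 ≤ tblF m j := by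
  unfold tblF; split_ifs
  · exact le_refl 0
  · exact zero_le_one
  · exact Int.emod_nonneg _ (by omega)

theorem tblF_emod (m : Int) (j : Nat) : tblF m j % m = (Nat.fib j : Int) % m := by
  unfold tblF; split_ifs with h0 h1
  · subst h0; simp
  · subst h1; simp [Nat.fib_one]
  · exact Int.emod_emod_of_dvd _ dvd_rfl

theorem tbl_step (mb : Nat) (n : Nat) :
    PySem.Int.band (tblF (2 ^ mb) (n + 1) + tblF (2 ^ mb) n) (2 ^ mb - 1)
      = tblF (2 ^ mb) (n + 2) := by
  have hm : (0:Int) < 2 ^ mb := by positivity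
  rw [band_mask _ _ (by have := tblF_nonneg _ hm (n+1); have := tblF_nonneg _ hm n; omega)]
  rw [Int.add_emod, tblF_emod, tblF_emod, ← Int.add_emod]
  have : tblF (2 ^ mb) (n + 2) = (Nat.fib (n+2) : Int) % 2 ^ mb := by
    unfold tblF; simp
  rw [this, Nat.fib_add_two]
  push_cast; ring_nf

theorem tbl_band (mb b : Nat) (hb : b ≤ mb) (j : Nat) :
    PySem.Int.band (tblF (2 ^ mb) j) (2 ^ b - 1) = (Nat.fib j : Int) % 2 ^ b := by
  have hm : (0:Int) < 2 ^ mb := by positivity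
  rw [band_mask _ _ (tblF_nonneg _ hm j)]
  unfold tblF; split_ifs with h0 h1
  · subst h0; simp
  · subst h1; simp [Nat.fib_one]
  · exact Int.emod_emod_of_dvd _ (pow_dvd_pow 2 hb)

theorem table_inv (mb L : Nat) (_hL : 2 ≤ L) (n : Nat) (hn : 2 + n ≤ L) :
    ((PySem.List.pyRange 2 (2 + (n:Int)) 1).foldl
      (fun fb i =>
        PySem.List.pySetD fb i
          (PySem.Int.band
            (PySem.List.pyGetD fb (i - 1) 0 + PySem.List.pyGetD fb (i - 2) 0)
            (2 ^ mb - 1)))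
      ((List.replicate L (0:Int)).set 1 1)).length = L ∧
    ∀ j : Nat, j < L →
      ((PySem.List.pyRange 2 (2 + (n:Int)) 1).foldl
        (fun fb i =>
          PySem.List.pySetD fb i
            (PySem.Int.band
              (PySem.List.pyGetD fb (i - 1) 0 + PySem.List.pyGetD fb (i - 2) 0)
              (2 ^ mb - 1)))
        ((List.replicate L (0:Int)).set 1 1)).getD j 0
        = if j < 2 + n then tblF (2 ^ mb) j else 0 := by
  induction n with
  | zero =>
      rw [show ((2:Int) + (0:Nat)) = 2 by norm_num, PySem.List.pyRange_one_eq_nil (by omega)]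
      simp only [List.foldl_nil]
      refine ⟨by simp, ?_⟩
      intro j hj
      rw [List.getD_eq_getElem?_getD, List.getElem?_set]
      simp only [List.getElem?_replicate]
      split_ifs with h1 h2 h3 <;> simp_all [tblF] <;> omega
  | succ n ih =>
      obtain ⟨ihlen, ihval⟩ := ih (by omega)
      rw [show ((2:Int) + ((n+1 : Nat)):Int) = (2 + (n:Int)) + 1 by push_cast; ring,
        PySem.List.pyRange_one_succ_right (by omega), List.foldl_append, List.foldl_cons,
        List.foldl_nil]
      set F := (PySem.List.pyRange 2 (2 + (n:Int)) 1).foldl _ ((List.replicate L (0:Int)).set 1 1) with hF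
      have hg1 : PySem.List.pyGetD F (2 + (n:Int) - 1) 0 = tblF (2 ^ mb) (n+1) := by
        rw [show (2 + (n:Int) - 1) = ((n+1 : Nat) : Int) by push_cast; ring,
          PySem.List.pyGetD_natCast, ihval (n+1) (by omega), if_pos (by omega : n+1 < 2+n)]
      have hg2 : PySem.List.pyGetD F (2 + (n:Int) - 2) 0 = tblF (2 ^ mb) n := by
        rw [show (2 + (n:Int) - 2) = ((n : Nat) : Int) by omega,
          PySem.List.pyGetD_natCast, ihval n (by omega), if_pos (by omega : n < 2+n)]
      rw [hg1, hg2, tbl_step,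
        show ((2:Int) + (n:Int)) = (((n+2 : Nat)) : Int) by omega,
        PySem.List.pySetD_natCast]
      refine ⟨by simp [ihlen], ?_⟩
      intro j hj
      rw [List.getD_eq_getElem?_getD, List.getElem?_set]
      by_cases h1 : (n + 2 : Nat) = j
      · rw [if_pos h1, if_pos (by rw [ihlen]; omega), Option.getD_some, if_pos (by omega), ← h1]
      · rw [if_neg h1, ← List.getD_eq_getElem?_getD, ihval j hj]
        split_ifs <;> first | rfl | omega

theorem setloop (v : Int → Int) (L : Nat) (r0 : List Int) (hr : r0.length = L) (n : Nat) (hn : n ≤ L) :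
    ((PySem.List.pyRange 0 (n:Int) 1).foldl (fun r i => PySem.List.pySetD r i (v i)) r0).length = L ∧
    ∀ j : Nat, j < L →
      ((PySem.List.pyRange 0 (n:Int) 1).foldl (fun r i => PySem.List.pySetD r i (v i)) r0).getD j 0
        = if j < n then v j else r0.getD j 0 := by
  induction n with
  | zero =>
      rw [show ((0:Nat):Int) = 0 by norm_num, PySem.List.pyRange_one_eq_nil (by omega)]
      simp [hr]
  | succ n ih =>
      obtain ⟨ihlen, ihval⟩ := ih (by omega)
      rw [show (((n+1 : Nat)):Int) = (n:Int) + 1 by push_cast; ring,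
        PySem.List.pyRange_one_succ_right (by positivity), List.foldl_append, List.foldl_cons,
        List.foldl_nil]
      set F := (PySem.List.pyRange 0 (n:Int) 1).foldl (fun r i => PySem.List.pySetD r i (v i)) r0 with hF
      rw [show ((n:Int)) = ((n : Nat) : Int) by rfl, PySem.List.pySetD_natCast]
      refine ⟨by simp [ihlen], ?_⟩
      intro j hj
      rw [List.getD_eq_getElem?_getD, List.getElem?_set]
      by_cases h1 : n = j
      · rw [if_pos h1, if_pos (by rw [ihlen]; omega), Option.getD_some, if_pos (by omega), ← h1]
      · rw [if_neg h1, ← List.getD_eq_getElem?_getD, ihval j hj]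
        split_ifs <;> first | rfl | omega

theorem solution_agree (A B : List Int) (hpre : Pre_solution A B) : solution A B = solution_alt A B := by
  obtain ⟨hne, hlen, hgem1, ⟨a0, ha0mem, ha0⟩, hbpre⟩ := hpre
  rcases hA : PySem.List.max? A (fun x => x) with _ | maxa
  · exact absurd ((PySem.List.max?_eq_none_iff _ _).mp hA) hne
  have hmaxA : ∀ a ∈ A, a ≤ maxa := PySem.List.max?_isMax hA
  have hmaxa0 : 0 ≤ maxa := le_trans ha0 (hmaxA a0 ha0mem)
  have hAlenpos : 0 < A.length := List.length_pos_iff.mpr hne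
  have hBne : B ≠ [] := by
    intro h; apply hne; subst h
    simp only [List.length_nil] at hlen
    exact List.length_eq_zero_iff.mp (by omega)
  rcases hB : PySem.List.max? B (fun x => x) with _ | maxb
  · exact absurd ((PySem.List.max?_eq_none_iff _ _).mp hB) hBne
  have hmaxB : ∀ b ∈ B, b ≤ maxb := PySem.List.max?_isMax hB
  have hBlenpos : 0 < B.length := by omega
  have hb0mem : B[0] ∈ B.take A.length := by
    have h0 : (B.take A.length)[0]'(by simp; omega) = B[0] := List.getElem_take
    rw [← h0]; exact List.getElem_mem _
  have hmaxb0 : 0 ≤ maxb := le_trans (hbpre _ hb0mem) (hmaxB _ (List.mem_of_mem_take hb0mem))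
  set mb : Nat := maxb.toNat with hmb
  set L : Nat := (maxa + 2).toNat with hLdef
  have hL2 : 2 ≤ L := by omega
  have hLI : (L : Int) = maxa + 2 := by omega
  obtain ⟨htlen, htval⟩ := table_inv mb L hL2 (L - 2) (by omega)
  set Ftbl := (PySem.List.pyRange 2 (2 + ((L - 2 : Nat) : Int)) 1).foldl
      (fun fb i =>
        PySem.List.pySetD fb i
          (PySem.Int.band
            (PySem.List.pyGetD fb (i - 1) 0 + PySem.List.pyGetD fb (i - 2) 0)
            (2 ^ mb - 1)))
      ((List.replicate L (0:Int)).set 1 1) with hFtbl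
  unfold solution
  simp only [hA, hB, Option.getD_some, shiftl_one_int]
  rw [← hLdef, PySem.List.pySetD_of_nonneg _ _ (by norm_num : (0:Int) ≤ 1)]
  simp only [Int.toNat_one, Int.toNat_natCast]
  rw [show (maxa + 2 : Int) = 2 + ((L - 2 : Nat) : Int) by omega, ← hFtbl]
  obtain ⟨hrlen, hrval⟩ := setloop
    (fun i => PySem.Int.band (PySem.List.pyGetD Ftbl (PySem.List.pyGetD A i 0 + 1) 0)
      (2 ^ (PySem.List.pyGetD B i 0).toNat - 1))
    A.length (List.replicate A.length 0) (by simp) A.length le_rfl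
  apply List.ext_getElem
  · rw [hrlen]; simp [solution_alt]; omega
  intro j hj1 hj2
  rw [hrlen] at hj1
  rw [← List.getD_eq_getElem (d := 0), hrval j hj1, if_pos hj1]
  have hjB : j < B.length := by omega
  have hAj : PySem.List.pyGetD A (j : Int) 0 = A[j] := by
    rw [PySem.List.pyGetD_natCast, List.getD_eq_getElem]
  have hBj : PySem.List.pyGetD B (j : Int) 0 = B[j] := by
    rw [PySem.List.pyGetD_natCast, List.getD_eq_getElem]
  have haj1 : -1 ≤ A[j] := hgem1 _ (List.getElem_mem _)
  have haj2 : A[j] ≤ maxa := hmaxA _ (List.getElem_mem _)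
  have hbj0 : 0 ≤ B[j] := by
    apply hbpre
    have h0 : (B.take A.length)[j]'(by simp; omega) = B[j] := List.getElem_take
    rw [← h0]; exact List.getElem_mem _
  have hbj2 : B[j].toNat ≤ mb := by
    have := hmaxB _ (List.getElem_mem hjB); omega
  have hk : ((A[j] + 1).toNat : Int) = A[j] + 1 := by omega
  have hkL : (A[j] + 1).toNat < L := by omega
  simp only [hAj, hBj]
  rw [show A[j] + 1 = (((A[j] + 1).toNat : Nat) : Int) from hk.symm,
    PySem.List.pyGetD_natCast, htval _ hkL, if_pos (by omega), tbl_band mb _ hbj2]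
  simp only [solution_alt, List.getElem_map, List.getElem_zip, shiftl_one_int,
    fdPair_eq]

-- ===== VERDICT (by name: the statement is the Claim_ definition above) =====
theorem solution_spec : Claim_equal_solution := by
  intro A B _hdom hpre
  unfold Spec_solution
  exact solution_agree A B hpre
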